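-- pv_equiv track=rewrite | github.com/Victoradukwu/data_structures_algorithms | dsa/misc/codesignal.py | calculate_jump
-- ===== SOURCE A (Python) =====
-- from typing import Literal
--
-- def calculate_jump(forest: list[int], start: int, direction: Literal[-1, 1]) -> int:
--     """Codesignal
--
--     `forest` is a list containing `1` (an obstacle) and `0`(an available position). Write a function that returns the minimum step
--     size that can successfully take you from the `start` to the end of the forest without htting an obstacle. If it is not possible to navigate without hitting an obstacle, return `-1`. The `direction` is either `1` (moving rightwards) or `-1` (moving leftward)
--     """
--
--     jump = 1
--     n = len(forest)
--
--     while 0 <= start + (direction * jump) < n: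
--         pos = start
--         while 0 <= pos < n:
--             if forest[pos] == 1:
--                 break
--             pos += direction * jump
--         else:
--             return jump
--         jump += 1
--
--     return jump
-- ===== SOURCE B (Python) =====
-- def calculate_jump(forest, start, direction):
--     n = len(forest)
--     if not (0 <= start < n):
--         return 1
--     obstacles = [i for i, v in enumerate(forest) if v == 1]
--     jump = 1
--     while 0 <= start + direction * jump < n:
--         step = direction * jump
--         if not any((o - start) * direction >= 0 and (o - start) % step == 0 for o in obstacles):
--             return jump
--         jump += 1
--     return jump
-- ===== Notes on version B (the rewrite author's own statement) =====
-- stated objective: alternative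
-- what changed: B collects obstacle indices once and replaces A's inner step-by-step walk through the forest by a divisibility-and-direction test over that obstacle list (plus an early return 1 when start is outside the forest, where the walk is trivially empty); the outer jump loop is kept; Pre_ excludes only direction == 0 with start inside the forest, where A loops forever.
import Mathlib
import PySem

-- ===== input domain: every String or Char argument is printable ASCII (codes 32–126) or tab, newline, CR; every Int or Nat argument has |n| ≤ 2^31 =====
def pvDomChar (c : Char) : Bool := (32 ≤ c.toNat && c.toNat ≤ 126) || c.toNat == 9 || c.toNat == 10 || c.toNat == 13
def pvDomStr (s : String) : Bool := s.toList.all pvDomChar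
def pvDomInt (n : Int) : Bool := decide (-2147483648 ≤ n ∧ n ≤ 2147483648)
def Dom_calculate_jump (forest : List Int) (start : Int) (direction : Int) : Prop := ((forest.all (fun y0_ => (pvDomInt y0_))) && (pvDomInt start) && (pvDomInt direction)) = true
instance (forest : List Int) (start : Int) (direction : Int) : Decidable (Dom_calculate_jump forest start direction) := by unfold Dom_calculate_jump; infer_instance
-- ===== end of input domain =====

-- B replaces A's inner step-by-step walk by a divisibility test over a precollected obstacle list (objective: alternative).

-- ===== PORT A =====
-- inner 'while 0 <= pos < n: if forest[pos]==1: break; pos += step' — true = break (hit), false = walked off ('else: return jump').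
-- The fuel argument only makes the recursion structural; it is never exhausted on inputs satisfying Pre_.
def pvInnerA (forest : List Int) (step : Int) : Int → Nat → Bool
  | _, 0 => false
  | pos, fuel + 1 =>
    if 0 ≤ pos ∧ pos < (forest.length : Int) then
      if PySem.List.pyGetD forest pos 0 == 1 then true
      else pvInnerA forest step (pos + step) fuel
    else false

-- outer 'while 0 <= start + direction*jump < n'
def pvOuterA (forest : List Int) (start direction : Int) : Int → Nat → Int
  | jump, 0 => jump
  | jump, fuel + 1 =>
    if 0 ≤ start + direction * jump ∧ start + direction * jump < (forest.length : Int) then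
      if pvInnerA forest (direction * jump) start (forest.length + 1) then
        pvOuterA forest start direction (jump + 1) fuel
      else jump
    else jump

def calculate_jump (forest : List Int) (start : Int) (direction : Int) : Int :=
  pvOuterA forest start direction 1 (forest.length + start.natAbs + 2)

-- ===== PORT B =====
-- 'any((o - start) * direction >= 0 and (o - start) % step == 0 for o in obstacles)'
def pvHitsB (obstacles : List Int) (start direction step : Int) : Bool :=
  obstacles.any (fun o => decide ((o - start) * direction ≥ 0) && (PySem.Int.mod (o - start) step == 0))

def pvOuterB (n : Int) (obstacles : List Int) (start direction : Int) : Int → Nat → Int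
  | jump, 0 => jump
  | jump, fuel + 1 =>
    if 0 ≤ start + direction * jump ∧ start + direction * jump < n then
      if !pvHitsB obstacles start direction (direction * jump) then jump
      else pvOuterB n obstacles start direction (jump + 1) fuel
    else jump

def calculate_jump_alt (forest : List Int) (start : Int) (direction : Int) : Int :=
  if ¬(0 ≤ start ∧ start < (forest.length : Int)) then 1
  else
    let obstacles := ((PySem.List.enumerate forest 0).filter (fun p => p.2 == 1)).map (·.1)
    pvOuterB (forest.length : Int) obstacles start direction 1 (forest.length + start.natAbs + 2)

-- ===== PRECONDITION & SPEC =====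
-- Pre_ excludes exactly the inputs where Python A never returns: direction == 0 with start inside the
-- forest makes A's loops run forever (B raises ZeroDivisionError there). A returns on every other input.
def Pre_calculate_jump (forest : List Int) (start : Int) (direction : Int) : Prop :=
  direction ≠ 0 ∨ ¬(0 ≤ start ∧ start < (forest.length : Int))
instance (forest : List Int) (start : Int) (direction : Int) : Decidable (Pre_calculate_jump forest start direction) := by unfold Pre_calculate_jump; infer_instance

def pvWitness_calculate_jump : List Int × Int × Int := ([0, 1, 0], 0, 1)

def Spec_calculate_jump (forest : List Int) (start : Int) (direction : Int) (out : Int) : Prop := out = calculate_jump_alt forest start direction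
instance (forest : List Int) (start : Int) (direction : Int) (out : Int) : Decidable (Spec_calculate_jump forest start direction out) := by unfold Spec_calculate_jump; infer_instance

-- ===== CLAIM (what is proved, stated in full; the proofs are below) =====
def Claim_equal_calculate_jump : Prop := ∀ (forest : List Int) (start : Int) (direction : Int), Dom_calculate_jump forest start direction → Pre_calculate_jump forest start direction → Spec_calculate_jump forest start direction (calculate_jump forest start direction)

-- ===== LEMMAS AND PROOFS =====

-- membership in B's precollected obstacle list
theorem pv_mem_obstacles (forest : List Int) (o : Int) :
    (o ∈ ((PySem.List.enumerate forest 0).filter (fun p => p.2 == 1)).map (·.1)) ↔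
      (0 ≤ o ∧ o < (forest.length : Int) ∧ PySem.List.pyGetD forest o 0 = 1) := by
  simp only [List.mem_map, List.mem_filter, PySem.List.mem_enumerate_iff, beq_iff_eq]
  constructor
  · rintro ⟨p, ⟨⟨k, hk, rfl⟩, h1⟩, rfl⟩
    simp only at h1 ⊢
    refine ⟨by omega, by omega, ?_⟩
    have h : ((0:Int) + k) = (k : Int) := by omega
    rw [h, PySem.List.pyGetD_natCast]
    simp [List.getD_eq_getElem?_getD, hk, h1]
  · rintro ⟨h0, hn, h1⟩
    have hk : o.toNat < forest.length := by omega
    refine ⟨(o, forest[o.toNat]), ⟨⟨o.toNat, hk, by simp [Int.toNat_of_nonneg h0]⟩, ?_⟩, rfl⟩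
    rw [PySem.List.pyGetD_eq_getElem forest 0 h0 hn] at h1
    simpa using h1

-- soundness: the inner walk hits an obstacle only at a visited position
theorem pv_innerA_sound (forest : List Int) (step : Int) :
    ∀ (fuel : Nat) (pos : Int), pvInnerA forest step pos fuel = true →
      ∃ k : Nat, 0 ≤ pos + k * step ∧ pos + k * step < (forest.length : Int) ∧
        PySem.List.pyGetD forest (pos + k * step) 0 = 1 := by
  intro fuel
  induction fuel with
  | zero => intro pos h; simp [pvInnerA] at h
  | succ f ih =>
    intro pos h
    rw [pvInnerA] at h
    split at h
    · rename_i hin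
      by_cases h1 : PySem.List.pyGetD forest pos 0 = 1
      · exact ⟨0, by simpa using ⟨hin.1, hin.2, h1⟩⟩
      · rw [if_neg (by simpa using h1)] at h
        obtain ⟨k, hk1, hk2, hk3⟩ := ih (pos + step) h
        refine ⟨k + 1, ?_, ?_, ?_⟩
        · push_cast; linarith
        · push_cast; linarith
        · convert hk3 using 2; push_cast; ring
    · exact absurd h (by simp)

-- completeness: an obstacle on an in-range prefix of the walk is hit
theorem pv_innerA_complete (forest : List Int) (step : Int) :
    ∀ (k fuel : Nat) (pos : Int), k < fuel →
      (∀ k' : Nat, k' ≤ k → 0 ≤ pos + k' * step ∧ pos + k' * step < (forest.length : Int)) →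
      PySem.List.pyGetD forest (pos + k * step) 0 = 1 →
      pvInnerA forest step pos fuel = true := by
  intro k
  induction k with
  | zero =>
    intro fuel pos hf hrange h1
    obtain ⟨f, rfl⟩ : ∃ f, fuel = f + 1 := ⟨fuel - 1, by omega⟩
    rw [pvInnerA]
    have h0 := hrange 0 le_rfl
    simp only [Nat.cast_zero, zero_mul, add_zero] at h0 h1
    rw [if_pos h0, if_pos (by simpa using h1)]
  | succ n ih =>
    intro fuel pos hf hrange h1
    obtain ⟨f, rfl⟩ : ∃ f, fuel = f + 1 := ⟨fuel - 1, by omega⟩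
    rw [pvInnerA]
    have h0 := hrange 0 (by omega)
    simp only [Nat.cast_zero, zero_mul, add_zero] at h0
    rw [if_pos h0]
    by_cases hob : PySem.List.pyGetD forest pos 0 = 1
    · rw [if_pos (by simpa using hob)]
    · rw [if_neg (by simpa using hob)]
      apply ih f (pos + step) (by omega)
      · intro k' hk'
        have := hrange (k' + 1) (by omega)
        push_cast at this ⊢
        constructor <;> linarith [this.1, this.2]
      · convert h1 using 2; push_cast; ring

-- the two inner tests agree (start in range, direction ≠ 0, 1 ≤ jump)
theorem pv_inner_eq (forest : List Int) (start direction jump : Int)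
    (hs0 : 0 ≤ start) (hsn : start < (forest.length : Int)) (hd : direction ≠ 0) (hj : 1 ≤ jump) :
    pvInnerA forest (direction * jump) start (forest.length + 1) =
      pvHitsB (((PySem.List.enumerate forest 0).filter (fun p => p.2 == 1)).map (·.1))
        start direction (direction * jump) := by
  have hd2 : 1 ≤ direction * direction := by rcases lt_or_gt_of_ne hd with h | h <;> nlinarith
  have hpos : (1:Int) ≤ direction * direction * jump := by nlinarith
  have hstep : direction * jump ≠ 0 := mul_ne_zero hd (by omega)
  rw [Bool.eq_iff_iff]
  unfold pvHitsB
  simp only [List.any_eq_true, Bool.and_eq_true, decide_eq_true_eq, beq_iff_eq,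
    PySem.Int.mod_eq_zero_iff_dvd]
  constructor
  · intro h
    obtain ⟨k, hk1, hk2, hk3⟩ := pv_innerA_sound forest (direction * jump) _ start h
    refine ⟨start + k * (direction * jump), (pv_mem_obstacles forest _).2 ⟨hk1, hk2, hk3⟩, ?_, ?_⟩
    · have hk0 : (0:Int) ≤ (k:Int) := Int.natCast_nonneg k
      have he : (start + (k:Int) * (direction * jump) - start) * direction
          = (k:Int) * (direction * direction * jump) := by ring
      rw [he]
      nlinarith
    · exact ⟨k, by ring⟩
  · rintro ⟨o, hmem, hsign, m, hm⟩
    obtain ⟨ho0, hon, ho1⟩ := (pv_mem_obstacles forest o).1 hmem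
    have he : (o - start) * direction = m * (direction * direction * jump) := by rw [hm]; ring
    have hm0 : 0 ≤ m := by nlinarith
    have hmk : (m.toNat : Int) = m := Int.toNat_of_nonneg hm0
    have hm' : o = start + (m.toNat : Int) * (direction * jump) := by rw [hmk]; linear_combination hm
    have habs : (1:Int) ≤ |direction * jump| := Int.one_le_abs hstep
    have hk0 : (0:Int) ≤ (m.toNat:Int) := Int.natCast_nonneg _
    have hb1 : (m.toNat:Int) ≤ (m.toNat:Int) * |direction * jump| :=
      le_mul_of_one_le_right hk0 habs
    have hb2 : (m.toNat:Int) * |direction * jump| = |o - start| := by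
      rw [hm', show start + (m.toNat:Int) * (direction * jump) - start
        = (m.toNat:Int) * (direction * jump) by ring, abs_mul ((m.toNat:Int)) (direction*jump), abs_of_nonneg hk0]
    have hb3 : |o - start| < (forest.length : Int) := abs_lt.2 ⟨by omega, by omega⟩
    have hkb : m.toNat < forest.length + 1 := by
      have h2 : (m.toNat:Int) < (forest.length : Int) := by linarith
      omega
    refine pv_innerA_complete forest (direction * jump) m.toNat (forest.length + 1) start hkb
      ?_ (by rw [← hm']; exact ho1)
    intro k' hk'
    have hc : (k':Int) ≤ (m.toNat:Int) := by exact_mod_cast hk'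
    have hk'0 : (0:Int) ≤ (k':Int) := Int.natCast_nonneg k'
    rcases lt_or_gt_of_ne hstep with hneg | hposs
    · have a1 : (m.toNat:Int) * (direction * jump) ≤ (k':Int) * (direction * jump) := by nlinarith
      have a2 : (k':Int) * (direction * jump) ≤ 0 := by nlinarith
      exact ⟨by linarith, by linarith⟩
    · have a1 : (k':Int) * (direction * jump) ≤ (m.toNat:Int) * (direction * jump) := by nlinarith
      have a2 : 0 ≤ (k':Int) * (direction * jump) := mul_nonneg hk'0 hposs.le
      exact ⟨by linarith, by linarith⟩


-- the two outer loops agree step for step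
theorem pv_outer_eq (forest : List Int) (start direction : Int)
    (hs0 : 0 ≤ start) (hsn : start < (forest.length : Int)) (hd : direction ≠ 0) :
    ∀ (fuel : Nat) (jump : Int), 1 ≤ jump →
      pvOuterA forest start direction jump fuel =
        pvOuterB (forest.length : Int)
          (((PySem.List.enumerate forest 0).filter (fun p => p.2 == 1)).map (·.1))
          start direction jump fuel := by
  intro fuel
  induction fuel with
  | zero => intro jump _; rfl
  | succ f ih =>
    intro jump hj
    rw [pvOuterA, pvOuterB]
    rw [pv_inner_eq forest start direction jump hs0 hsn hd hj]
    split
    · cases h : pvHitsB (((PySem.List.enumerate forest 0).filter (fun p => p.2 == 1)).map (·.1))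
        start direction (direction * jump) <;> simp [ih (jump + 1) (by omega)]
    · rfl

-- ===== VERDICT (by name: the statement is the Claim_ definition above) =====
theorem calculate_jump_spec : Claim_equal_calculate_jump := by
  intro forest start direction _ hpre
  unfold Spec_calculate_jump calculate_jump calculate_jump_alt
  by_cases hin : 0 ≤ start ∧ start < (forest.length : Int)
  · have hd : direction ≠ 0 := by
      rcases hpre with h | h
      · exact h
      · exact absurd hin h
    simp only [hin]
    exact pv_outer_eq forest start direction hin.1 hin.2 hd _ 1 le_rfl
  · -- start outside the forest: A's inner walk is empty, both return 1
    simp only [hin, not_false_eq_true, if_true]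
    show pvOuterA forest start direction 1 ((forest.length + start.natAbs + 1) + 1) = 1
    rw [pvOuterA]
    have hinner : pvInnerA forest (direction * 1) start (forest.length + 1) = false := by
      rw [pvInnerA]
      simp [hin]
    rw [hinner]
    simp
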